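-- pv_equiv track=rewrite | github.com/KJohnson-700/PSB | scripts/run_backtest_rigorous.py | _strategy_results_in_period_order
-- ===== SOURCE A (Python) =====
-- from typing import Any, Dict, List, Optional, Tuple
--
-- def _strategy_results_in_period_order(
--     all_results: List[dict],
--     strategy: str,
--     baseline_stress_name: Optional[str],
--     ordered_labels: List[str],
-- ) -> List[dict]:
--     """Return baseline results for one strategy sorted by period order (no errors)."""
--     strategy_results = [
--         r
--         for r in all_results
--         if r.get("strategy") == strategy
--         and "error" not in r
--         and r.get("stress") == baseline_stress_name
--     ]
--     label_to_index = {lb: i for i, lb in enumerate(ordered_labels)}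
--     strategy_results.sort(
--         key=lambda r: label_to_index.get(r.get("period_label", ""), 999)
--     )
--     return strategy_results
-- ===== SOURCE B (Python) =====
-- from typing import List, Optional
--
-- def _strategy_results_in_period_order(
--     all_results: List[dict],
--     strategy: str,
--     baseline_stress_name: Optional[str],
--     ordered_labels: List[str],
-- ) -> List[dict]:
--     """Baseline results for one strategy grouped into buckets by period index,
--     then concatenated in increasing index order (a bucket sort, no record-level sort)."""
--     label_to_index = {lb: i for i, lb in enumerate(ordered_labels)}
--     buckets = {}
--     for r in all_results:
--         if (
--             r.get("strategy") == strategy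
--             and "error" not in r
--             and r.get("stress") == baseline_stress_name
--         ):
--             k = label_to_index.get(r.get("period_label", ""), 999)
--             buckets.setdefault(k, []).append(r)
--     return [r for k in sorted(buckets) for r in buckets[k]]
-- ===== Notes on version B (the rewrite author's own statement) =====
-- stated objective: alternative
-- what changed: Replaces the stable key-sort of a filtered list by a one-pass bucket sort: results are appended to a dict of buckets keyed by their integer period index while filtering, and the buckets are concatenated in increasing key order.
import Mathlib
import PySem

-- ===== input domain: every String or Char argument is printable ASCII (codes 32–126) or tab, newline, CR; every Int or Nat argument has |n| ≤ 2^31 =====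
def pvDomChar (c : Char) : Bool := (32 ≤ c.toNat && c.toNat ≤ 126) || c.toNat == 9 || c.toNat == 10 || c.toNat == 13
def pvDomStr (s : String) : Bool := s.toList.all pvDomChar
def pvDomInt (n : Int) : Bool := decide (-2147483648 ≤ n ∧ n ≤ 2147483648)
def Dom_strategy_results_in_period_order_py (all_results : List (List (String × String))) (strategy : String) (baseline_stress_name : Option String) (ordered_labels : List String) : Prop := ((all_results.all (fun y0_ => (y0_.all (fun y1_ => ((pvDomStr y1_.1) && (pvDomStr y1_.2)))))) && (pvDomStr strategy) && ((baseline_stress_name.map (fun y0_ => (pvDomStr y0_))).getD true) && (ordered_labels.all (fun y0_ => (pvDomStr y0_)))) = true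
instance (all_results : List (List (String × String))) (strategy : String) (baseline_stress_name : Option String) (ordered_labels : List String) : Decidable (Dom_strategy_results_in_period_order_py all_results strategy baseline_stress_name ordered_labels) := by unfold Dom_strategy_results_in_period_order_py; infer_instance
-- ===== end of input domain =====

-- ===== PORT A =====
-- B replaces the stable key-sort of the filtered results by a one-pass bucket sort keyed
-- by the integer period index (objective: alternative).

-- shared helpers naming the Python filter condition, the label->index map and the sort key
def pvCond (strategy : String) (baseline_stress_name : Option String) (r : List (String × String)) : Bool :=
  PySem.Dict.get? (PySem.Dict.mk r) "strategy" == some strategy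
  && !(PySem.Dict.contains (PySem.Dict.mk r) "error")
  && PySem.Dict.get? (PySem.Dict.mk r) "stress" == baseline_stress_name

def pvLabelToIndex (ordered_labels : List String) : PySem.Dict String Int :=
  (PySem.List.enumerate ordered_labels).foldl
    (fun d p => PySem.Dict.insert d p.2 p.1) PySem.Dict.empty

def pvKey (label_to_index : PySem.Dict String Int) (r : List (String × String)) : Int :=
  PySem.Dict.getD label_to_index (PySem.Dict.getD (PySem.Dict.mk r) "period_label" "") 999

def strategy_results_in_period_order_py (all_results : List (List (String × String))) (strategy : String) (baseline_stress_name : Option String) (ordered_labels : List String) : List (List (String × String)) :=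
  let strategy_results := all_results.filter (pvCond strategy baseline_stress_name)
  let label_to_index := pvLabelToIndex ordered_labels
  PySem.List.sorted strategy_results (pvKey label_to_index)

-- ===== PORT B =====
def strategy_results_in_period_order_py_alt (all_results : List (List (String × String))) (strategy : String) (baseline_stress_name : Option String) (ordered_labels : List String) : List (List (String × String)) :=
  let label_to_index := pvLabelToIndex ordered_labels
  -- buckets.setdefault(k, []).append(r) is Dict.modify at key k with append
  let buckets := all_results.foldl (fun d r =>
    if pvCond strategy baseline_stress_name r then
      PySem.Dict.modify d (pvKey label_to_index r) [] (· ++ [r])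
    else d) (PySem.Dict.empty : PySem.Dict Int (List (List (String × String))))
  (PySem.List.sorted (PySem.Dict.keys buckets) (fun k => k)).flatMap
    (fun k => PySem.Dict.getD buckets k [])

-- ===== PRECONDITION & SPEC =====
def Spec_strategy_results_in_period_order_py (all_results : List (List (String × String))) (strategy : String) (baseline_stress_name : Option String) (ordered_labels : List String) (out : List (List (String × String))) : Prop := out = strategy_results_in_period_order_py_alt all_results strategy baseline_stress_name ordered_labels
instance (all_results : List (List (String × String))) (strategy : String) (baseline_stress_name : Option String) (ordered_labels : List String) (out : List (List (String × String))) : Decidable (Spec_strategy_results_in_period_order_py all_results strategy baseline_stress_name ordered_labels out) := by unfold Spec_strategy_results_in_period_order_py; infer_instance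

-- ===== CLAIM (what is proved, stated in full; the proofs are below) =====
def Claim_equal_strategy_results_in_period_order_py : Prop := ∀ (all_results : List (List (String × String))) (strategy : String) (baseline_stress_name : Option String) (ordered_labels : List String), Dom_strategy_results_in_period_order_py all_results strategy baseline_stress_name ordered_labels → Spec_strategy_results_in_period_order_py all_results strategy baseline_stress_name ordered_labels (strategy_results_in_period_order_py all_results strategy baseline_stress_name ordered_labels)

-- ===== LEMMAS AND PROOFS =====

-- insertBy walks past a prefix it is never 'before'
theorem pv_insertBy_append {α : Type} (before : α → α → Bool) (x : α) (l1 l2 : List α)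
    (h : ∀ y ∈ l1, before x y = false) :
    PySem.List.insertBy before x (l1 ++ l2) = l1 ++ PySem.List.insertBy before x l2 := by
  induction l1 with
  | nil => simp
  | cons a t ih =>
    simp only [List.cons_append, PySem.List.insertBy, h a (by simp)]
    simp only [Bool.false_eq_true, if_false]
    exact congrArg (a :: ·) (ih (fun y hy => h y (by simp [hy])))

-- inserting x into a strictly increasing chain of key-groups lands it at the end of its own group
theorem pv_insertBy_flat {α : Type} (key : α → Int) (x : α) (xs : List α) :
    ∀ (ks : List Int), ks.Pairwise (· < ·) → key x ∈ ks →
    PySem.List.insertBy (fun a b => decide (key a < key b)) x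
        (ks.flatMap (fun k => xs.filter (fun r => key r == k)))
      = ks.flatMap (fun k => (xs ++ [x]).filter (fun r => key r == k)) := by
  intro ks
  induction ks with
  | nil => intro _ hx; cases hx
  | cons k0 ks' ih =>
    intro hp hx
    have hp' := (List.pairwise_cons.mp hp).2
    have hk0lt := (List.pairwise_cons.mp hp).1
    have hGkey : ∀ k (y : α), y ∈ xs.filter (fun r => key r == k) → key y = k := by
      intro k y hy
      simpa using (List.of_mem_filter hy)
    by_cases hcase : key x = k0
    · -- x belongs to the head group
      have hpre : ∀ y ∈ xs.filter (fun r => key r == k0),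
          (fun a b => decide (key a < key b)) x y = false := by
        intro y hy
        simp [hGkey k0 y hy, hcase]
      rw [List.flatMap_cons, pv_insertBy_append _ _ _ _ hpre]
      have hrest : PySem.List.insertBy (fun a b => decide (key a < key b)) x
          (ks'.flatMap (fun k => xs.filter (fun r => key r == k)))
          = x :: ks'.flatMap (fun k => xs.filter (fun r => key r == k)) := by
        cases hr : ks'.flatMap (fun k => xs.filter (fun r => key r == k)) with
        | nil => simp [PySem.List.insertBy]
        | cons y t =>
          have hy : y ∈ ks'.flatMap (fun k => xs.filter (fun r => key r == k)) := by
            rw [hr]; exact List.mem_cons_self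
          obtain ⟨k, hk, hyk⟩ := List.mem_flatMap.mp hy
          have : key x < key y := by
            rw [hGkey k y hyk, hcase]; exact hk0lt k hk
          simp [PySem.List.insertBy, this]
      rw [hrest]
      have htail : ks'.flatMap (fun k => (xs ++ [x]).filter (fun r => key r == k))
          = ks'.flatMap (fun k => xs.filter (fun r => key r == k)) := by
        apply List.flatMap_congr
        intro k hk
        have : ¬ (key x == k) = true := by
          simp [hcase]; exact ne_of_lt (hk0lt k hk)
        simp [List.filter_append, this]
      rw [List.flatMap_cons, htail, List.filter_append]
      simp [hcase]
    · -- x belongs to a later group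
      have hx' : key x ∈ ks' := by
        cases hx with
        | head => exact absurd rfl hcase
        | tail _ h => exact h
      have hpre : ∀ y ∈ xs.filter (fun r => key r == k0),
          (fun a b => decide (key a < key b)) x y = false := by
        intro y hy
        have : k0 < key x := hk0lt _ hx'
        simp [hGkey k0 y hy]
        omega
      rw [List.flatMap_cons, pv_insertBy_append _ _ _ _ hpre, ih hp' hx',
        List.flatMap_cons, List.filter_append]
      have : ¬ (key x == k0) = true := by simp [hcase]
      simp [this]

-- selection of each key-group over a strictly increasing key list containing every key reproduces the stable sort
theorem pv_groups_eq_sorted {α : Type} (key : α → Int) (xs : List α) :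
    ∀ (ks : List Int), ks.Pairwise (· < ·) → (∀ r ∈ xs, key r ∈ ks) →
    ks.flatMap (fun k => xs.filter (fun r => key r == k)) = PySem.List.sorted xs key := by
  induction xs using List.reverseRecOn with
  | nil =>
    intro ks _ _
    rw [PySem.List.sorted_eq_foldl_insertBy]
    simp
  | append_singleton xs x ih =>
    intro ks hp hall
    rw [PySem.List.sorted_eq_foldl_insertBy, List.foldl_append, List.foldl_cons, List.foldl_nil,
      ← PySem.List.sorted_eq_foldl_insertBy,
      ← ih ks hp (fun r hr => hall r (by simp [hr]))]
    exact (pv_insertBy_flat key x xs ks hp (hall x (by simp))).symm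

-- the whole B pipeline (conditional bucket loop, then concatenation of the buckets in
-- increasing key order) equals the stable key-sort of the filtered list
theorem pv_bucket {α : Type} (cond : α → Bool) (key : α → Int) (xs : List α) :
    (PySem.List.sorted
        (PySem.Dict.keys (xs.foldl (fun d r => if cond r then
            PySem.Dict.modify d (key r) [] (· ++ [r]) else d)
          (PySem.Dict.empty : PySem.Dict Int (List α)))) (fun k => k)).flatMap
      (fun k => PySem.Dict.getD (xs.foldl (fun d r => if cond r then
            PySem.Dict.modify d (key r) [] (· ++ [r]) else d)
          (PySem.Dict.empty : PySem.Dict Int (List α))) k [])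
    = PySem.List.sorted (xs.filter cond) key := by
  have hfold : xs.foldl (fun d r => if cond r then
        PySem.Dict.modify d (key r) [] (· ++ [r]) else d)
        (PySem.Dict.empty : PySem.Dict Int (List α))
      = ((xs.filter cond).map (fun r => (key r, r))).foldl
        (fun d p => PySem.Dict.modify d p.1 [] (· ++ [p.2])) PySem.Dict.empty := by
    rw [List.foldl_map, List.foldl_filter]
  rw [hfold]
  have hgetD : ∀ k, PySem.Dict.getD (((xs.filter cond).map (fun r => (key r, r))).foldl
      (fun d p => PySem.Dict.modify d p.1 [] (· ++ [p.2])) PySem.Dict.empty) k []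
      = (xs.filter cond).filter (fun r => key r == k) := by
    intro k
    rw [PySem.Dict.getD_foldl_modify_append]
    simp [List.filter_map, Function.comp_def]
  have hkeys : PySem.Dict.keys (((xs.filter cond).map (fun r => (key r, r))).foldl
      (fun d p => PySem.Dict.modify d p.1 [] (· ++ [p.2])) PySem.Dict.empty)
      = PySem.Set.ofList ((xs.filter cond).map key) := by
    rw [PySem.Dict.keys_foldl_modify_key]
    simp [PySem.Dict.keys_empty, PySem.Set.update, PySem.Set.ofList_eq_foldl, List.map_map,
      Function.comp_def]
  simp only [hgetD, hkeys]
  exact pv_groups_eq_sorted key (xs.filter cond) _ (PySem.List.sorted_ofList_pairwise_lt _)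
    (fun r hr => by rw [PySem.List.mem_sorted, PySem.Set.mem_ofList]; exact List.mem_map_of_mem hr)

-- ===== VERDICT (by name: the statement is the Claim_ definition above) =====
theorem strategy_results_in_period_order_py_spec : Claim_equal_strategy_results_in_period_order_py := by
  intro all_results strategy baseline_stress_name ordered_labels _
  unfold Spec_strategy_results_in_period_order_py
  unfold strategy_results_in_period_order_py strategy_results_in_period_order_py_alt
  exact (pv_bucket (pvCond strategy baseline_stress_name)
    (pvKey (pvLabelToIndex ordered_labels)) all_results).symm
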